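-- pv_equiv track=rewrite | github.com/oldnordic/ai-coder-assistant | src/frontend/ui/pr_tab_widgets.py | format_issues_by_severity
-- ===== SOURCE A (Python) =====
-- from typing import List, Dict, Any, Optional
--
-- def format_issues_by_severity(issues: List[Dict]) -> str:
--     """Format issues by severity."""
--     severity_counts = {}
--     for issue in issues:
--         severity = issue.get('severity', 'unknown')
--         severity_counts[severity] = severity_counts.get(severity, 0) + 1
--
--     result = []
--     for severity in ['critical', 'high', 'medium', 'low']:
--         if severity in severity_counts:
--             result.append(f"- {severity}: {severity_counts[severity]}")
--
--     return '\n'.join(result)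
-- ===== SOURCE B (Python) =====
-- def format_issues_by_severity(issues):
--     """Format issues by severity."""
--     rank = {'critical': 0, 'high': 1, 'medium': 2, 'low': 3}
--     sevs = sorted(
--         [s for s in (issue.get('severity', 'unknown') for issue in issues) if s in rank],
--         key=lambda s: rank[s],
--     )
--     groups = []
--     for s in sevs:
--         if groups and groups[-1][0] == s:
--             groups[-1] = (s, groups[-1][1] + 1)
--         else:
--             groups.append((s, 1))
--     return '\n'.join(f"- {s}: {n}" for s, n in groups)
-- ===== Notes on version B (the rewrite author's own statement) =====
-- stated objective: alternative
-- what changed: Replaces A's count-table construction with a sort-then-group algorithm: B projects issues to severity strings, filters to the four known labels, sorts them by severity rank, and run-length-encodes adjacent equal elements into the output lines (no count table and no per-label counting; missing severities disappear automatically).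
import Mathlib
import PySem

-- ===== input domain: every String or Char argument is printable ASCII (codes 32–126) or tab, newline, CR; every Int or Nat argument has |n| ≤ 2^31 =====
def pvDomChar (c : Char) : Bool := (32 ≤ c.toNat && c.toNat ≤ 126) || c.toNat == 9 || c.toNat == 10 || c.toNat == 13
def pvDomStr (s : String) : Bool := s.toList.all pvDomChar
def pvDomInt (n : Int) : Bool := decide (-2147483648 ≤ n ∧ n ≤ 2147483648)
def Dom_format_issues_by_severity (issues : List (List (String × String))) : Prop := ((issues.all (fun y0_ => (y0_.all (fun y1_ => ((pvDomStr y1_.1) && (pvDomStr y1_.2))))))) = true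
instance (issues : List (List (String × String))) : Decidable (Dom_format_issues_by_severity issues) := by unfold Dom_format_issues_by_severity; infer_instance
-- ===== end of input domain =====

-- B replaces A's severity count table by a different algorithm: project to severity strings, filter to the four known labels, sort by rank, and run-length-encode adjacent equal elements into the lines (alternative; not claimed faster).


-- ===== PORT A =====
-- issue.get('severity', 'unknown') on the Python dict `issue`
def pvSev (issue : List (String × String)) : String :=
  PySem.Dict.getD (PySem.Dict.ofList issue) "severity" "unknown"

def format_issues_by_severity (issues : List (List (String × String))) : String :=
  let severity_counts : PySem.Dict String Int :=
    issues.foldl (fun d issue =>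
      let severity := pvSev issue
      d.insert severity (d.getD severity 0 + 1)) PySem.Dict.empty
  let result : List String :=
    ["critical", "high", "medium", "low"].foldl (fun r severity =>
      if severity_counts.contains severity then
        r ++ ["- " ++ severity ++ ": " ++ PySem.Int.toStr (severity_counts.getD severity 0)]
      else r) []
  PySem.Str.join "\n" result

-- ===== PORT B =====
-- rank = {'critical': 0, 'high': 1, 'medium': 2, 'low': 3}
def pvRankDict : PySem.Dict String Int :=
  PySem.Dict.ofList [("critical", 0), ("high", 1), ("medium", 2), ("low", 3)]

-- the sort key `lambda s: rank[s]`; a KeyError is impossible since the list was filtered by `s in rank`, so rank[s] is ported as getD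
def pvRank (s : String) : Int := PySem.Dict.getD pvRankDict s 0

-- the body of B's run-length-encoding loop over `sevs`
def pvStep (gs : List (String × Int)) (s : String) : List (String × Int) :=
  match gs.getLast? with
  | some (t, n) => if t == s then gs.dropLast ++ [(s, n + 1)] else gs ++ [(s, 1)]
  | none => [(s, 1)]

def format_issues_by_severity_alt (issues : List (List (String × String))) : String :=
  let sevs : List String :=
    PySem.List.sorted ((issues.map pvSev).filter (fun s => pvRankDict.contains s)) pvRank false
  let groups : List (String × Int) := sevs.foldl pvStep []
  PySem.Str.join "\n" (groups.map (fun p => "- " ++ p.1 ++ ": " ++ PySem.Int.toStr p.2))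

-- ===== PRECONDITION & SPEC =====
def Spec_format_issues_by_severity (issues : List (List (String × String))) (out : String) : Prop := out = format_issues_by_severity_alt issues
instance (issues : List (List (String × String))) (out : String) : Decidable (Spec_format_issues_by_severity issues out) := by unfold Spec_format_issues_by_severity; infer_instance

-- ===== CLAIM (what is proved, stated in full; the proofs are below) =====
def Claim_equal_format_issues_by_severity : Prop := ∀ (issues : List (List (String × String))), Dom_format_issues_by_severity issues → Spec_format_issues_by_severity issues (format_issues_by_severity issues)

-- ===== LEMMAS AND PROOFS =====

-- the comparison the sort uses
def pvBef (a b : String) : Bool := decide (pvRank a < pvRank b)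

-- A sorted-by-rank list of the four labels is a concatenation of replicate blocks.
def pvCanon (a b c d : Nat) : List String :=
  List.replicate a "critical" ++ (List.replicate b "high" ++ (List.replicate c "medium" ++ List.replicate d "low"))

theorem pvInsertBy_front {bef : String → String → Bool} {x : String} {ys : List String}
    (h : ∀ y ∈ ys, bef x y = true) : PySem.List.insertBy bef x ys = x :: ys := by
  cases ys with
  | nil => simp [PySem.List.insertBy]
  | cons y ys => simp [PySem.List.insertBy, h y (by simp)]

theorem pvInsertBy_skip {bef : String → String → Bool} {x y : String} (h : bef x y = false) :
    ∀ (n : Nat) (rest : List String),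
      PySem.List.insertBy bef x (List.replicate n y ++ rest) = List.replicate n y ++ PySem.List.insertBy bef x rest
  | 0, rest => by simp
  | n + 1, rest => by
    simp [List.replicate_succ, PySem.List.insertBy, h, pvInsertBy_skip h n rest]

theorem pvInsertBy_last {bef : String → String → Bool} {x y : String} (h : bef x y = false) (n : Nat) :
    PySem.List.insertBy bef x (List.replicate n y) = List.replicate n y ++ [x] := by
  have := pvInsertBy_skip h n []
  simpa [PySem.List.insertBy] using this

theorem pvIns_c (a b c d : Nat) : PySem.List.insertBy pvBef "critical" (pvCanon a b c d) = pvCanon (a + 1) b c d := by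
  unfold pvCanon
  rw [pvInsertBy_skip (by decide), pvInsertBy_front (by
    intro y hy
    simp only [List.mem_append] at hy
    rcases hy with hy | hy | hy <;> rw [List.eq_of_mem_replicate hy] <;> decide)]
  simp [List.replicate_succ']

theorem pvIns_h (a b c d : Nat) : PySem.List.insertBy pvBef "high" (pvCanon a b c d) = pvCanon a (b + 1) c d := by
  unfold pvCanon
  rw [pvInsertBy_skip (by decide), pvInsertBy_skip (by decide), pvInsertBy_front (by
    intro y hy
    simp only [List.mem_append] at hy
    rcases hy with hy | hy <;> rw [List.eq_of_mem_replicate hy] <;> decide)]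
  simp [List.replicate_succ', List.append_assoc]

theorem pvIns_m (a b c d : Nat) : PySem.List.insertBy pvBef "medium" (pvCanon a b c d) = pvCanon a b (c + 1) d := by
  unfold pvCanon
  rw [pvInsertBy_skip (by decide), pvInsertBy_skip (by decide), pvInsertBy_skip (by decide),
    pvInsertBy_front (by
      intro y hy
      rw [List.eq_of_mem_replicate hy]
      decide)]
  simp [List.replicate_succ', List.append_assoc]

theorem pvIns_l (a b c d : Nat) : PySem.List.insertBy pvBef "low" (pvCanon a b c d) = pvCanon a b c (d + 1) := by
  unfold pvCanon
  rw [pvInsertBy_skip (by decide), pvInsertBy_skip (by decide), pvInsertBy_skip (by decide),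
    pvInsertBy_last (by decide)]
  simp [List.replicate_succ']

-- the four labels
def pvIsLabel (s : String) : Prop := s = "critical" ∨ s = "high" ∨ s = "medium" ∨ s = "low"

theorem pvFold_insert_canon : ∀ (ss : List String) (a b c d : Nat), (∀ s ∈ ss, pvIsLabel s) →
    ss.foldl (fun acc x => PySem.List.insertBy pvBef x acc) (pvCanon a b c d)
      = pvCanon (a + ss.count "critical") (b + ss.count "high") (c + ss.count "medium") (d + ss.count "low")
  | [], a, b, c, d, _ => by simp
  | s :: ss, a, b, c, d, h => by
    have hs := h s (by simp)
    have hss : ∀ x ∈ ss, pvIsLabel x := fun x hx => h x (by simp [hx])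
    simp only [List.foldl_cons]
    rcases hs with hs | hs | hs | hs <;> subst hs
    · rw [pvIns_c, pvFold_insert_canon ss _ _ _ _ hss,
        List.count_cons_self, List.count_cons_of_ne (by decide), List.count_cons_of_ne (by decide),
        List.count_cons_of_ne (by decide), Nat.add_assoc, Nat.add_comm 1]
    · rw [pvIns_h, pvFold_insert_canon ss _ _ _ _ hss,
        List.count_cons_self, List.count_cons_of_ne (by decide), List.count_cons_of_ne (by decide),
        List.count_cons_of_ne (by decide), Nat.add_assoc, Nat.add_comm 1]
    · rw [pvIns_m, pvFold_insert_canon ss _ _ _ _ hss,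
        List.count_cons_self, List.count_cons_of_ne (by decide), List.count_cons_of_ne (by decide),
        List.count_cons_of_ne (by decide), Nat.add_assoc, Nat.add_comm 1]
    · rw [pvIns_l, pvFold_insert_canon ss _ _ _ _ hss,
        List.count_cons_self, List.count_cons_of_ne (by decide), List.count_cons_of_ne (by decide),
        List.count_cons_of_ne (by decide), Nat.add_assoc, Nat.add_comm 1]

theorem pvContains_label (s : String) (h : pvRankDict.contains s = true) : pvIsLabel s := by
  have hd : pvRankDict = PySem.Dict.mk [("critical", 0), ("high", 1), ("medium", 2), ("low", 3)] := by decide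
  rw [hd, PySem.Dict.contains_mk] at h
  unfold pvIsLabel
  simp at h
  tauto

theorem pvSorted_canon (ss : List String) (h : ∀ s ∈ ss, pvIsLabel s) :
    PySem.List.sorted ss pvRank false
      = pvCanon (ss.count "critical") (ss.count "high") (ss.count "medium") (ss.count "low") := by
  rw [PySem.List.sorted_eq_foldl_insertBy]
  have hnil : pvCanon 0 0 0 0 = [] := by simp [pvCanon]
  rw [← hnil]
  rw [show (List.foldl (fun acc x => PySem.List.insertBy (fun a b => decide (pvRank a < pvRank b)) x acc)
      (pvCanon 0 0 0 0) ss) = List.foldl (fun acc x => PySem.List.insertBy pvBef x acc) (pvCanon 0 0 0 0) ss from rfl]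
  rw [pvFold_insert_canon ss 0 0 0 0 h]
  simp

-- one run-length step onto a fresh label
theorem pvStep_fresh (gs : List (String × Int)) (s : String)
    (h : ∀ t n, gs.getLast? = some (t, n) → t ≠ s) : pvStep gs s = gs ++ [(s, 1)] := by
  unfold pvStep
  cases hl : gs.getLast? with
  | none => simp [List.getLast?_eq_none_iff.mp hl]
  | some p =>
    obtain ⟨t, n⟩ := p
    have := h t n hl
    simp [this]

-- absorbing a whole replicate block into the last group
theorem pvFold_step_same (s : String) : ∀ (n : Nat) (gs : List (String × Int)) (k : Int),
    (List.replicate n s).foldl pvStep (gs ++ [(s, k)]) = gs ++ [(s, k + n)]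
  | 0, gs, k => by simp
  | n + 1, gs, k => by
    have hstep : pvStep (gs ++ [(s, k)]) s = gs ++ [(s, k + 1)] := by
      unfold pvStep
      simp
    rw [List.replicate_succ, List.foldl_cons, hstep, pvFold_step_same s n gs (k + 1)]
    have : k + 1 + (n : Int) = k + ((n + 1 : Nat) : Int) := by push_cast; ring
    rw [this]

theorem pvFold_step_block (s : String) (m : Nat) (gs : List (String × Int))
    (h : ∀ t k, gs.getLast? = some (t, k) → t ≠ s) :
    (List.replicate (m + 1) s).foldl pvStep gs = gs ++ [(s, ((m + 1 : Nat) : Int))] := by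
  rw [List.replicate_succ, List.foldl_cons, pvStep_fresh gs s h, pvFold_step_same s m gs 1]
  have : (1 : Int) + (m : Int) = ((m + 1 : Nat) : Int) := by push_cast; ring
  rw [this]

-- run-length encoding of a list of replicate blocks with pairwise-distinct labels
theorem pvFold_step_blocks : ∀ (bls : List (String × Nat)) (gs : List (String × Int)),
    (∀ t k, gs.getLast? = some (t, k) → ∀ p ∈ bls, t ≠ p.1) →
    bls.Pairwise (fun p q => p.1 ≠ q.1) →
    (bls.flatMap (fun p => List.replicate p.2 p.1)).foldl pvStep gs
      = gs ++ bls.flatMap (fun p => if p.2 = 0 then [] else [(p.1, (p.2 : Int))])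
  | [], gs, _, _ => by simp
  | (s, n) :: bls, gs, h, hp => by
    have hp' := (List.pairwise_cons.mp hp).2
    have hhead := (List.pairwise_cons.mp hp).1
    simp only [List.flatMap_cons, List.foldl_append]
    cases n with
    | zero =>
      rw [List.replicate_zero, List.foldl_nil,
        pvFold_step_blocks bls gs (fun t k hl p hpmem => h t k hl p (by simp [hpmem])) hp']
      simp
    | succ m =>
      rw [pvFold_step_block s m gs (fun t k hl => h t k hl (s, m + 1) (by simp)),
        pvFold_step_blocks bls (gs ++ [(s, ((m + 1 : Nat) : Int))]) (by
          intro t k hl p hpmem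
          simp only [List.getLast?_concat, Option.some.injEq, Prod.mk.injEq] at hl
          rw [← hl.1]
          exact hhead p hpmem) hp']
      simp

-- A's dict loop, started from any dict, adds the per-severity count to each lookup.
theorem pvCounts_getD (v : String) : ∀ (issues : List (List (String × String))) (d : PySem.Dict String Int),
    (issues.foldl (fun d issue =>
      d.insert (pvSev issue) (d.getD (pvSev issue) 0 + 1)) d).getD v 0
      = d.getD v 0 + (issues.countP (fun i => pvSev i == v) : Int)
  | [], d => by simp
  | i :: is, d => by
    simp only [List.foldl_cons, List.countP_cons]
    rw [pvCounts_getD v is, PySem.Dict.getD_insert]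
    by_cases h : v = pvSev i
    · subst h; simp; ring
    · simp [h, Ne.symm h]

-- A key is in the dict built by the loop iff it occurs (or was there already).
theorem pvCounts_contains (v : String) : ∀ (issues : List (List (String × String))) (d : PySem.Dict String Int),
    (issues.foldl (fun d issue =>
      d.insert (pvSev issue) (d.getD (pvSev issue) 0 + 1)) d).contains v
      = (d.contains v || issues.any (fun i => pvSev i == v))
  | [], d => by simp
  | i :: is, d => by
    simp only [List.foldl_cons, List.any_cons]
    rw [pvCounts_contains v is, PySem.Dict.contains_insert]
    by_cases h : v = pvSev i
    · simp [h]
    · simp [Bool.or_left_comm, BEq.comm, Bool.or_assoc]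

-- the count of a label among the filtered severities is its count among the issues
theorem pvCount_filtered (issues : List (List (String × String))) (v : String)
    (hv : pvRankDict.contains v = true) :
    ((issues.map pvSev).filter (fun s => pvRankDict.contains s)).count v
      = issues.countP (fun i => pvSev i == v) := by
  rw [List.count_filter hv]
  simp [List.count, List.countP_map, Function.comp_def]

-- ===== VERDICT (by name: the statement is the Claim_ definition above) =====
theorem format_issues_by_severity_spec : Claim_equal_format_issues_by_severity := by
  intro issues _
  unfold Spec_format_issues_by_severity format_issues_by_severity format_issues_by_severity_alt
  dsimp only
  congr 1
  -- A's result list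
  rw [PySem.List.foldl_append_if]
  -- B's sorted list is a concatenation of replicate blocks
  rw [pvSorted_canon _ (fun s hs => pvContains_label s (List.of_mem_filter hs))]
  rw [pvCount_filtered issues "critical" (by decide), pvCount_filtered issues "high" (by decide),
      pvCount_filtered issues "medium" (by decide), pvCount_filtered issues "low" (by decide)]
  -- run-length encode the blocks
  have hblocks : pvCanon (issues.countP (fun i => pvSev i == "critical")) (issues.countP (fun i => pvSev i == "high"))
      (issues.countP (fun i => pvSev i == "medium")) (issues.countP (fun i => pvSev i == "low"))
      = ([("critical", issues.countP (fun i => pvSev i == "critical")),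
          ("high", issues.countP (fun i => pvSev i == "high")),
          ("medium", issues.countP (fun i => pvSev i == "medium")),
          ("low", issues.countP (fun i => pvSev i == "low"))] : List (String × Nat)).flatMap
            (fun p => List.replicate p.2 p.1) := by
    simp [pvCanon]
  rw [hblocks, pvFold_step_blocks _ [] (by simp) (by
    simp only [List.pairwise_cons]
    refine ⟨?_, ?_, ?_, ?_⟩ <;> first
      | (intro p hp; simp only [List.mem_cons, List.not_mem_nil] at hp;
         rcases hp with h | h | h | h <;> (try subst h) <;> simp_all)
      | simp)]
  -- both sides are now explicit four-block lists; compare label by label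
  simp only [List.nil_append, List.flatMap_cons, List.flatMap_nil, List.append_nil, List.map_append]
  -- reduce A's filter over the literal label list
  have hA : ∀ v : String, (issues.foldl (fun d issue =>
      d.insert (pvSev issue) (d.getD (pvSev issue) 0 + 1)) (PySem.Dict.empty : PySem.Dict String Int)).contains v
      = issues.any (fun i => pvSev i == v) := by
    intro v; rw [pvCounts_contains]; simp
  have hG : ∀ v : String, (issues.foldl (fun d issue =>
      d.insert (pvSev issue) (d.getD (pvSev issue) 0 + 1)) (PySem.Dict.empty : PySem.Dict String Int)).getD v 0
      = (issues.countP (fun i => pvSev i == v) : Int) := by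
    intro v; rw [pvCounts_getD]; simp
  have hcase : ∀ v : String,
      (if (issues.foldl (fun d issue =>
          d.insert (pvSev issue) (d.getD (pvSev issue) 0 + 1)) (PySem.Dict.empty : PySem.Dict String Int)).contains v then
        ([v] : List String) else []).map (fun severity => "- " ++ severity ++ ": " ++
          PySem.Int.toStr ((issues.foldl (fun d issue =>
            d.insert (pvSev issue) (d.getD (pvSev issue) 0 + 1)) (PySem.Dict.empty : PySem.Dict String Int)).getD severity 0))
      = (if issues.countP (fun i => pvSev i == v) = 0 then ([] : List (String × Int)) else
          [(v, (issues.countP (fun i => pvSev i == v) : Int))]).map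
            (fun p => "- " ++ p.1 ++ ": " ++ PySem.Int.toStr p.2) := by
    intro v
    simp only [hA, hG]
    rcases Nat.eq_zero_or_pos (issues.countP (fun i => pvSev i == v)) with h | h
    · have hany : issues.any (fun i => pvSev i == v) = false := by
        rw [List.countP_eq_zero] at h
        simp only [List.any_eq_false]
        intro x hx; simpa using h x hx
      simp [hany, h]
    · have hany : issues.any (fun i => pvSev i == v) = true := by
        rw [List.any_eq_true]
        exact List.countP_pos_iff.mp h
      simp [hany, Nat.pos_iff_ne_zero.mp h]
  -- split A's filtered label list into its four independent blocks
  have hsplit : ∀ (p : String → Bool) (f : String → String),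
      (List.filter p ["critical", "high", "medium", "low"]).map f
      = ((if p "critical" then ["critical"] else []).map f) ++ (((if p "high" then ["high"] else []).map f)
        ++ (((if p "medium" then ["medium"] else []).map f) ++ ((if p "low" then ["low"] else []).map f))) := by
    intro p f
    by_cases h1 : p "critical" <;> by_cases h2 : p "high" <;> by_cases h3 : p "medium" <;>
      by_cases h4 : p "low" <;> simp [h1, h2, h3, h4]
  rw [hsplit, hcase "critical", hcase "high", hcase "medium", hcase "low"]
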